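-- pv_equiv track=rewrite | github.com/rdszhao/pilltok | pic2meds/processmeds.py | extract_dosage
-- ===== SOURCE A (Python) =====
-- def extract_dosage(label_words):
--   for i in range(len(label_words)):
--     if label_words[i] == 'M':
--       dose = label_words[i - 1] + " MG"
--
--     elif label_words[i] in ['MG', 'MCG']:
--       dose = label_words[i - 1] + " " + label_words[i]
--
--     elif label_words[i] == '5MG':
--        dose = '5 MG'
--   return dose
-- ===== SOURCE B (Python) =====
-- def extract_dosage(label_words):
--     # scan backwards: the first marker found from the end is the last forward match
--     for i in range(len(label_words) - 1, -1, -1):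
--         w = label_words[i]
--         if w == 'M':
--             return label_words[i - 1] + " MG"
--         if w in ('MG', 'MCG'):
--             return label_words[i - 1] + " " + w
--         if w == '5MG':
--             return '5 MG'
--     raise ValueError("no dosage marker found")
-- ===== Notes on version B (the rewrite author's own statement) =====
-- stated objective: idiomatic
-- what changed: Backward scan with an immediate return at the first marker found (the last forward match), instead of a forward loop that keeps overwriting a local and returns it at the end; Pre_ excludes lists without any marker word, where A raises UnboundLocalError and B raises ValueError.
import Mathlib
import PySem

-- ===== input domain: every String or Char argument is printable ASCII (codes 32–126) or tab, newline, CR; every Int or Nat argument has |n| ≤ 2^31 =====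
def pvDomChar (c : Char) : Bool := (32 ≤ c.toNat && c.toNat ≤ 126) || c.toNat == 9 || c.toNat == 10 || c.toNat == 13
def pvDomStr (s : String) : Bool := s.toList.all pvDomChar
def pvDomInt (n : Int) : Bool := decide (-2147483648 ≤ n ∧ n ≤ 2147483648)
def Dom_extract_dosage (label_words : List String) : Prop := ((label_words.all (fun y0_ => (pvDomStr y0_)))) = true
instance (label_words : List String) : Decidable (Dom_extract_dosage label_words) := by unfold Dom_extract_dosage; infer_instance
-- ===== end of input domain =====

-- B replaces A's forward overwrite-and-return-last loop by a backward scan returning at the first marker (idiomatic).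


-- ===== PORT A =====
-- forward loop over indices, each match overwrites the optional local `dose`; the final `return dose`
-- is the accumulated option ((getD "" is never reached under Pre_: A raises UnboundLocalError there))
def extract_dosage (label_words : List String) : String :=
  ((PySem.List.pyRange 0 (label_words.length : Int) 1).foldl (fun dose i =>
      let w := PySem.List.pyGetD label_words i ""
      if w = "M" then some (PySem.List.pyGetD label_words (i - 1) "" ++ " MG")
      else if w = "MG" ∨ w = "MCG" then
        some (PySem.List.pyGetD label_words (i - 1) "" ++ " " ++ w)
      else if w = "5MG" then some "5 MG"
      else dose) (none : Option String)).getD ""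

-- ===== PORT B =====
-- backward index scan, early return on first marker; [] = loop exhausted, where B raises (outside Pre_)
def extract_dosage_altGo (label_words : List String) : List Int → String
  | [] => ""
  | i :: rest =>
    let w := PySem.List.pyGetD label_words i ""
    if w = "M" then PySem.List.pyGetD label_words (i - 1) "" ++ " MG"
    else if w = "MG" ∨ w = "MCG" then PySem.List.pyGetD label_words (i - 1) "" ++ " " ++ w
    else if w = "5MG" then "5 MG"
    else extract_dosage_altGo label_words rest

def extract_dosage_alt (label_words : List String) : String :=
  extract_dosage_altGo label_words
    (PySem.List.pyRange ((label_words.length : Int) - 1) (-1) (-1))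

-- ===== PRECONDITION & SPEC =====
-- Pre_ excludes lists with no marker word: there the Python A raises UnboundLocalError (and B ValueError)
def Pre_extract_dosage (label_words : List String) : Prop :=
  ∃ w ∈ label_words, w = "M" ∨ w = "MG" ∨ w = "MCG" ∨ w = "5MG"
instance (label_words : List String) : Decidable (Pre_extract_dosage label_words) := by
  unfold Pre_extract_dosage; infer_instance
def pvWitness_extract_dosage : List String := ["TAKE", "10", "MG", "DAILY"]
def Spec_extract_dosage (label_words : List String) (out : String) : Prop := out = extract_dosage_alt label_words
instance (label_words : List String) (out : String) : Decidable (Spec_extract_dosage label_words out) := by unfold Spec_extract_dosage; infer_instance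

-- ===== CLAIM (what is proved, stated in full; the proofs are below) =====
def Claim_equal_extract_dosage : Prop := ∀ (label_words : List String), Dom_extract_dosage label_words → Pre_extract_dosage label_words → Spec_extract_dosage label_words (extract_dosage label_words)

-- ===== LEMMAS AND PROOFS =====

-- the per-index "hit" of both programs, as an option
def pvHit (ws : List String) (i : Int) : Option String :=
  let w := PySem.List.pyGetD ws i ""
  if w = "M" then some (PySem.List.pyGetD ws (i - 1) "" ++ " MG")
  else if w = "MG" ∨ w = "MCG" then some (PySem.List.pyGetD ws (i - 1) "" ++ " " ++ w)
  else if w = "5MG" then some "5 MG"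
  else none

-- first hit along an index list
def pvFirst (ws : List String) : List Int → Option String
  | [] => none
  | i :: rest => (pvHit ws i).or (pvFirst ws rest)

theorem pvFirst_append (ws : List String) (l₁ l₂ : List Int) :
    pvFirst ws (l₁ ++ l₂) = (pvFirst ws l₁).or (pvFirst ws l₂) := by
  induction l₁ with
  | nil => simp [pvFirst]
  | cons a t ih => simp [pvFirst, ih, Option.or_assoc]

-- A's fold equals "first hit over the reversed index list, else the accumulator"
theorem foldl_eq_first (ws : List String) (l : List Int) (acc : Option String) :
    l.foldl (fun dose i =>
      let w := PySem.List.pyGetD ws i ""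
      if w = "M" then some (PySem.List.pyGetD ws (i - 1) "" ++ " MG")
      else if w = "MG" ∨ w = "MCG" then
        some (PySem.List.pyGetD ws (i - 1) "" ++ " " ++ w)
      else if w = "5MG" then some "5 MG"
      else dose) acc = (pvFirst ws l.reverse).or acc := by
  induction l generalizing acc with
  | nil => simp [pvFirst]
  | cons a t ih =>
    rw [List.foldl_cons, ih, List.reverse_cons, pvFirst_append, Option.or_assoc]
    congr 1
    simp only [pvFirst, pvHit, Option.or_none]
    split_ifs <;> simp

-- B's recursion computes the first hit (with "" for none)
theorem altGo_eq_first (ws : List String) (l : List Int) :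
    extract_dosage_altGo ws l = (pvFirst ws l).getD "" := by
  induction l with
  | nil => rfl
  | cons a t ih =>
    simp only [extract_dosage_altGo, pvFirst, pvHit, ih]
    split_ifs <;> simp

-- if pvFirst is none, every index in the list misses
theorem pvFirst_none_mem (ws : List String) (l : List Int) (h : pvFirst ws l = none)
    {i : Int} (hi : i ∈ l) : pvHit ws i = none := by
  induction l with
  | nil => simp at hi
  | cons a t ih =>
    simp only [pvFirst, Option.or_eq_none_iff] at h
    rcases List.mem_cons.mp hi with rfl | hm
    · exact h.1
    · exact ih h.2 hm

-- a marker word in the list yields a hit at its index, so pvFirst is some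
theorem pvFirst_isSome (ws : List String) (h : Pre_extract_dosage ws) :
    (pvFirst ws ((PySem.List.pyRange 0 (ws.length : Int) 1).reverse)).isSome := by
  obtain ⟨w, hw, hcase⟩ := h
  obtain ⟨k, hk, hget⟩ := List.mem_iff_getElem.mp hw
  cases hh : pvFirst ws ((PySem.List.pyRange 0 (ws.length : Int) 1).reverse) with
  | some v => rfl
  | none =>
    have hmemk : (k : Int) ∈ (PySem.List.pyRange 0 (ws.length : Int) 1).reverse := by
      rw [List.mem_reverse, PySem.List.mem_pyRange_one]
      exact ⟨Int.natCast_nonneg k, by exact_mod_cast hk⟩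
    have hmiss := pvFirst_none_mem ws _ hh hmemk
    have hgd : PySem.List.pyGetD ws (k : Int) "" = w := by
      rw [PySem.List.pyGetD_eq_getElem ws "" (Int.natCast_nonneg k) (by exact_mod_cast hk)]
      simpa using hget
    simp only [pvHit, hgd] at hmiss
    rcases hcase with rfl | rfl | rfl | rfl <;> simp_all

-- ===== VERDICT (by name: the statement is the Claim_ definition above) =====
theorem extract_dosage_spec : Claim_equal_extract_dosage := by
  intro ws _ hpre
  unfold Spec_extract_dosage extract_dosage extract_dosage_alt
  rw [foldl_eq_first, PySem.List.pyRange_neg_one_eq_reverse]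
  have : ((ws.length : Int) - 1) + 1 = (ws.length : Int) := by ring
  rw [show (-1 : Int) + 1 = 0 by ring, this, altGo_eq_first]
  cases hh : pvFirst ws ((PySem.List.pyRange 0 (ws.length : Int) 1).reverse) with
  | some v => simp [Option.or]
  | none => have := pvFirst_isSome ws hpre; simp [hh] at this
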